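-- pv_equiv track=rewrite | github.com/kellan/blogmarks | blogmarks/backfill_from_export.py | extract_via_from_tags
-- ===== SOURCE A (Python) =====
-- def extract_via_from_tags(tags_string):
--     """
--     Extract via value from tags string.
--     Returns the value after 'via:' or None if no via tag found.
--     """
--     if not tags_string:
--         return None
--
--     tags = tags_string.split()
--     for tag in tags:
--         if tag.startswith('via:'):
--             return tag[4:]  # Remove 'via:' prefix
--
--     return None
-- ===== SOURCE B (Python) =====
-- def extract_via_from_tags(tags_string):
--     """
--     Extract via value from tags string.
--     Returns the value after 'via:' or None if no via tag found.
--     """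
--     if not tags_string:
--         return None
--     s = tags_string
--     n = len(s)
--     i = 0
--     while i < n:
--         while i < n and s[i].isspace():
--             i += 1
--         j = i
--         while j < n and not s[j].isspace():
--             j += 1
--         tok = s[i:j]
--         if tok.startswith('via:'):
--             return tok[4:]
--         i = j
--     return None
-- ===== Notes on version B (the rewrite author's own statement) =====
-- stated objective: alternative
-- what changed: Replaces split()-the-whole-string-then-loop with a single index-based scan that skips whitespace, delimits one token at a time and returns as soon as the first matching tag is found, never materialising the list of all tokens.
import Mathlib
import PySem

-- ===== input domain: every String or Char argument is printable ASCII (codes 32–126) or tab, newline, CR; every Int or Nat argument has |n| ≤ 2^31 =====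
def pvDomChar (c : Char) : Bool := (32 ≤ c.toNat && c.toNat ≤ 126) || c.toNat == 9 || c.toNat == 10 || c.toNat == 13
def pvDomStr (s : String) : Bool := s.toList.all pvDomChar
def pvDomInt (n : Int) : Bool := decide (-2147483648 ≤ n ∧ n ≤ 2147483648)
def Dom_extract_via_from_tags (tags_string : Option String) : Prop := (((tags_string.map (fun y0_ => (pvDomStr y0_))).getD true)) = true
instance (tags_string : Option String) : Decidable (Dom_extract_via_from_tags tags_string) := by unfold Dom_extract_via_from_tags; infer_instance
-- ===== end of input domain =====

-- B replaces split()-then-loop by a single incremental token scan with early return; objective: alternative (same O(n) cost).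

-- ===== PORT A =====
-- the 'for tag in tags: if tag.startswith("via:"): return tag[4:]' loop
def pvLoopA : List String → Option String
  | [] => none
  | t :: ts =>
    if PySem.Str.startswith t "via:" then some (PySem.Str.slice t (some 4) none)
    else pvLoopA ts

def extract_via_from_tags (tags_string : Option String) : Option String :=
  match tags_string with
  | none => none            -- 'if not tags_string: return None'
  | some s =>
    if s = "" then none     -- '' is falsy too
    else pvLoopA (PySem.Str.split₀ s)

-- ===== PORT B =====
-- the outer 'while i < n' loop of Source B, on the remaining characters: skip whitespace,
-- delimit one token, test it, continue after it
def pvScanB (cs : List Char) : Option (List Char) :=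
  let rest := cs.dropWhile PySem.Chars.isspace
  if _hr : rest.isEmpty then none
  else
    let tok := rest.takeWhile (fun c => !PySem.Chars.isspace c)
    if PySem.Chars.startswith tok "via:".toList then some (tok.drop 4)
    else pvScanB (rest.drop tok.length)
termination_by cs.length
decreasing_by
  simp only [List.isEmpty_iff] at _hr
  have h1 : (cs.dropWhile PySem.Chars.isspace).length ≤ cs.length :=
    List.length_dropWhile_le _ _
  have h4 : ((cs.dropWhile PySem.Chars.isspace).takeWhile (fun c => !PySem.Chars.isspace c)).length
      ≤ (cs.dropWhile PySem.Chars.isspace).length :=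
    (List.takeWhile_sublist _).length_le
  have h2 : 0 < ((cs.dropWhile PySem.Chars.isspace).takeWhile (fun c => !PySem.Chars.isspace c)).length := by
    cases h : cs.dropWhile PySem.Chars.isspace with
    | nil => exact absurd h _hr
    | cons c r =>
      have hc : PySem.Chars.isspace c = false := by
        have := List.head_dropWhile_not (p := PySem.Chars.isspace) (l := cs) (by simp [h])
        simpa [h] using this
      simp [hc]
  simp only [List.length_drop]
  omega

def extract_via_from_tags_alt (tags_string : Option String) : Option String :=
  match tags_string with
  | none => none
  | some s =>
    if s = "" then none
    else (pvScanB s.toList).map String.ofList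

-- ===== PRECONDITION & SPEC =====
def Spec_extract_via_from_tags (tags_string : Option String) (out : Option String) : Prop := out = extract_via_from_tags_alt tags_string
instance (tags_string : Option String) (out : Option String) : Decidable (Spec_extract_via_from_tags tags_string out) := by unfold Spec_extract_via_from_tags; infer_instance

-- ===== CLAIM (what is proved, stated in full; the proofs are below) =====
def Claim_equal_extract_via_from_tags : Prop := ∀ (tags_string : Option String), Dom_extract_via_from_tags tags_string → Spec_extract_via_from_tags tags_string (extract_via_from_tags tags_string)

-- ===== LEMMAS AND PROOFS =====

-- accumulator-free restatement of PySem.Chars.split₀.go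
def myW : List Char → List Char → List (List Char)
  | [], cur => if cur.isEmpty then [] else [cur.reverse]
  | c :: l, cur =>
    if PySem.Chars.isspace c then
      if cur.isEmpty then myW l [] else cur.reverse :: myW l []
    else myW l (c :: cur)

theorem go_eq_myW : ∀ (l cur : List Char) (acc : List (List Char)),
    PySem.Chars.split₀.go l cur acc = acc.reverse ++ myW l cur := by
  intro l
  induction l with
  | nil =>
    intro cur acc
    by_cases h : cur.isEmpty <;> simp [PySem.Chars.split₀.go, myW, h]
  | cons c l ih =>
    intro cur acc
    by_cases hs : PySem.Chars.isspace c
    · by_cases hc : cur.isEmpty <;> simp [PySem.Chars.split₀.go, myW, hs, hc, ih]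
    · simp [PySem.Chars.split₀.go, myW, hs, ih]

theorem split₀_eq_myW (cs : List Char) : PySem.Chars.split₀ cs = myW cs [] := by
  simpa using go_eq_myW cs [] []

theorem myW_dropWhile (l : List Char) :
    myW l [] = myW (l.dropWhile PySem.Chars.isspace) [] := by
  induction l with
  | nil => rfl
  | cons c l ih =>
    by_cases hs : PySem.Chars.isspace c <;> simp [myW, hs, ih]

theorem myW_token : ∀ (l cur : List Char), cur ≠ [] →
    myW l cur = (cur.reverse ++ l.takeWhile (fun c => !PySem.Chars.isspace c)) ::
      myW (l.dropWhile (fun c => !PySem.Chars.isspace c)) [] := by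
  intro l
  induction l with
  | nil => intro cur hc; simp [myW, List.isEmpty_iff, hc]
  | cons c l ih =>
    intro cur hc
    by_cases hs : PySem.Chars.isspace c
    · simp [myW, hs, List.isEmpty_iff, hc]
    · simp only [myW, hs, List.dropWhile_cons]
      rw [ih (c :: cur) (by simp)]
      simp [hs]

theorem drop_len_takeWhile (p : Char → Bool) : ∀ (l : List Char),
    l.drop (l.takeWhile p).length = l.dropWhile p := by
  intro l
  induction l with
  | nil => rfl
  | cons c l ih =>
    by_cases h : p c <;> simp [h, ih]

theorem main_lemma : ∀ (l : List Char),
    pvLoopA ((myW l []).map String.ofList) = (pvScanB l).map String.ofList := by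
  intro l
  induction hn : l.length using Nat.strong_induction_on generalizing l with
  | _ n ih =>
  rw [pvScanB]
  cases hrest : l.dropWhile PySem.Chars.isspace with
  | nil =>
    rw [myW_dropWhile, hrest]
    simp [myW, pvLoopA]
  | cons c r =>
    have hc : PySem.Chars.isspace c = false := by
      have hne : l.dropWhile PySem.Chars.isspace ≠ [] := by simp [hrest]
      have := List.head_dropWhile_not (p := PySem.Chars.isspace) (l := l) hne
      simpa [hrest] using this
    have htok : (c :: r).takeWhile (fun x => !PySem.Chars.isspace x)
        = c :: r.takeWhile (fun x => !PySem.Chars.isspace x) := by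
      simp [hc]
    have hmw : myW l [] = ((c :: r).takeWhile (fun x => !PySem.Chars.isspace x)) ::
        myW ((c :: r).dropWhile (fun x => !PySem.Chars.isspace x)) [] := by
      rw [myW_dropWhile, hrest]
      show myW (c :: r) [] = _
      simp only [myW, hc, if_false, Bool.false_eq_true]
      rw [myW_token r [c] (by simp)]
      simp [htok, hc]
    rw [hmw]
    set tok := (c :: r).takeWhile (fun x => !PySem.Chars.isspace x) with htokdef
    simp only [List.map_cons, pvLoopA, List.isEmpty_cons]
    have hsw : PySem.Str.startswith (String.ofList tok) "via:"
        = PySem.Chars.startswith tok "via:".toList := by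
      simp [PySem.Str.startswith]
    by_cases hv : PySem.Chars.startswith tok "via:".toList = true
    · simp only [hsw, hv, if_true]
      simp [PySem.Str.slice, PySem.Chars.slice_eq_listSlice, PySem.List.slice_from _ (by norm_num : (0:Int) ≤ 4)]
    · simp only [hsw, hv, if_false, Bool.false_eq_true]
      have hlen : ((c :: r).drop tok.length).length < n := by
        have h1 : (c :: r).length ≤ l.length := by
          rw [← hrest]; exact List.length_dropWhile_le _ _
        have h2 : 0 < ((c :: r).takeWhile (fun x => !PySem.Chars.isspace x)).length := by
          simp [hc]
        have h4 : ((c :: r).takeWhile (fun x => !PySem.Chars.isspace x)).length ≤ (c :: r).length :=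
          (List.takeWhile_sublist _).length_le
        have h5 : tok.length = ((c :: r).takeWhile (fun x => !PySem.Chars.isspace x)).length := rfl
        simp only [List.length_drop]
        omega
      have hdrop : (c :: r).dropWhile (fun x => !PySem.Chars.isspace x)
          = (c :: r).drop tok.length := (drop_len_takeWhile _ _).symm
      rw [hdrop, ih _ hlen _ rfl]
      simp

theorem extract_via_from_tags_spec : Claim_equal_extract_via_from_tags := by
  unfold Claim_equal_extract_via_from_tags
  intro tags_string _
  unfold Spec_extract_via_from_tags extract_via_from_tags extract_via_from_tags_alt
  cases tags_string with
  | none => rfl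
  | some s =>
    by_cases hs : s = ""
    · simp [hs]
    · simp only [hs, if_false]
      rw [PySem.Str.split₀, split₀_eq_myW]
      exact main_lemma s.toList
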